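-- pv_equiv track=rewrite | github.com/Connectria/autonet | autonet/util/config_string.py | vlan_list_to_glob
-- ===== SOURCE A (Python) =====
-- def vlan_list_to_glob(vlans: list[int]) -> str:
--     """
--     Converts a VLAN ID list into a glob string commonly used by
--     Cisco-like CLIs.
--     :param vlans: The list of VLANs to convert to a glob.
--     :return:
--     """
--     vlans.sort()
--     in_range = False
--     glob = ''
--     for i, vid in enumerate(vlans):
--         # Match on first element
--         if i == 0:
--             glob = str(vid)
--         # Match if current element contiguous with the last
--         elif vid != vlans[i - 1] + 1:
--             # If we are in a range, then we have passed its end.  Append the last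
--             # element.
--             if in_range:
--                 glob = glob + f'-{vlans[i - 1]}'
--                 in_range = False
--             # Comma delimit and append current element.
--             glob = glob + f',{vid}'
--         # Element is contiguous with last, but we've hit the end of the list.
--         elif i + 1 == len(vlans):
--             in_range = False
--             glob = glob + f'-{vid}'
--         # If nothing above matched, then we are contiguous and therefore in
--         # a range.
--         else:
--             in_range = True
--
--     return glob
-- ===== SOURCE B (Python) =====
-- def vlan_list_to_glob(vlans: list[int]) -> str:
--     """
--     Converts a VLAN ID list into a glob string commonly used by
--     Cisco-like CLIs.
--     """
--     vlans.sort()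
--     n = len(vlans)
--     # boundary indices: 0, n, and every index where a new run starts
--     bounds = [i for i in range(n + 1) if i == 0 or i == n or vlans[i] != vlans[i - 1] + 1]
--     return ','.join(
--         str(vlans[s]) if e - s == 1 else f'{vlans[s]}-{vlans[e - 1]}'
--         for s, e in zip(bounds, bounds[1:]))
-- ===== Notes on version B (the rewrite author's own statement) =====
-- stated objective: alternative
-- what changed: Replaces A's stateful left-to-right scan (in_range flag, string grown element by element) by two stages: a comprehension computes the run-boundary index list, then each adjacent boundary pair is rendered by random access into the sorted list and joined.
import Mathlib
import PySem

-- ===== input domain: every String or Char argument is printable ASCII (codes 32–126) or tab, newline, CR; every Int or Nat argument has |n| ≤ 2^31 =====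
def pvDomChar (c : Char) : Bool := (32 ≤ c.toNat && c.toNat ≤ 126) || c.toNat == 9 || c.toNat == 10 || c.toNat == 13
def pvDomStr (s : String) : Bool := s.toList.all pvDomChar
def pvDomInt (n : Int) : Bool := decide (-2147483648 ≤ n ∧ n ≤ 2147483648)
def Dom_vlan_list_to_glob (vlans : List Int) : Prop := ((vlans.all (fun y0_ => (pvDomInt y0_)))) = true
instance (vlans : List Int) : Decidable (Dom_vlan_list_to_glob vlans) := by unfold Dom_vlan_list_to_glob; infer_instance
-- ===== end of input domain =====

-- B replaces A's stateful left-to-right scan (in_range flag, string grown element by element) by two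
-- stages: a comprehension computes the run-boundary index list, then adjacent boundary pairs are
-- rendered by random access into the sorted list and joined (objective: alternative).  Both the
-- Python A and the Python B sort the argument list in place; the equivalence proved here is about
-- the return value.

-- ===== PORT A =====
-- loop body of A's for-loop, as a named helper (state = (in_range, glob), entry = (i, vid))
def aBody (s : List Int) (st : Bool × String) (iv : Int × Int) : Bool × String :=
  let i := iv.1
  let vid := iv.2
  let in_range := st.1
  let glob := st.2
  if i = 0 then (in_range, PySem.Int.toStr vid)
  else if vid ≠ PySem.List.pyGetD s (i - 1) 0 + 1 then
    let st2 :=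
      if in_range then (false, glob ++ "-" ++ PySem.Int.toStr (PySem.List.pyGetD s (i - 1) 0))
      else (in_range, glob)
    (st2.1, st2.2 ++ "," ++ PySem.Int.toStr vid)
  else if i + 1 = (s.length : Int) then (false, glob ++ "-" ++ PySem.Int.toStr vid)
  else (true, glob)

def vlan_list_to_glob (vlans : List Int) : String :=
  ((PySem.List.enumerate (PySem.List.sorted vlans (fun x => x) false)).foldl
    (aBody (PySem.List.sorted vlans (fun x => x) false)) (false, "")).2

-- ===== PORT B =====
-- the comprehension's condition: i == 0 or i == n or vlans[i] != vlans[i - 1] + 1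
def condB (s : List Int) (n : Int) (i : Int) : Bool :=
  i == 0 || i == n || decide (PySem.List.pyGetD s i 0 ≠ PySem.List.pyGetD s (i - 1) 0 + 1)

-- bounds = [i for i in range(n + 1) if …]
def boundsB (s : List Int) : List Int :=
  (PySem.List.pyRange 0 ((s.length : Int) + 1) 1).filter (condB s (s.length : Int))

-- str(vlans[s]) if e - s == 1 else f'{vlans[s]}-{vlans[e-1]}'
def renderB (s : List Int) (p : Int × Int) : String :=
  if p.2 - p.1 = 1 then PySem.Int.toStr (PySem.List.pyGetD s p.1 0)
  else PySem.Int.toStr (PySem.List.pyGetD s p.1 0) ++ "-" ++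
       PySem.Int.toStr (PySem.List.pyGetD s (p.2 - 1) 0)

def vlan_list_to_glob_alt (vlans : List Int) : String :=
  PySem.Str.join ","
    (((boundsB (PySem.List.sorted vlans (fun x => x) false)).zip
        ((boundsB (PySem.List.sorted vlans (fun x => x) false)).drop 1)).map
      (renderB (PySem.List.sorted vlans (fun x => x) false)))

-- ===== PRECONDITION & SPEC =====
def Spec_vlan_list_to_glob (vlans : List Int) (out : String) : Prop := out = vlan_list_to_glob_alt vlans
instance (vlans : List Int) (out : String) : Decidable (Spec_vlan_list_to_glob vlans out) := by unfold Spec_vlan_list_to_glob; infer_instance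

-- ===== CLAIM (what is proved, stated in full; the proofs are below) =====
def Claim_equal_vlan_list_to_glob : Prop := ∀ (vlans : List Int), Dom_vlan_list_to_glob vlans → Spec_vlan_list_to_glob vlans (vlan_list_to_glob vlans)

-- ===== LEMMAS AND PROOFS =====

-- common characterisation: the maximal runs of the sorted list, built by right recursion
def mergeRuns (a p : Int) (rs : List (Int × Int)) : List (Int × Int) :=
  match rs with
  | (c, d) :: r => if c = p + 1 then (a, d) :: r else (a, p) :: (c, d) :: r
  | [] => [(a, p)]

def runsOf : List Int → List (Int × Int)
  | [] => []
  | v :: tl => mergeRuns v v (runsOf tl)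

def renderRun (p : Int × Int) : String :=
  if p.1 = p.2 then PySem.Int.toStr p.1
  else PySem.Int.toStr p.1 ++ "-" ++ PySem.Int.toStr p.2

lemma mergeRuns_head (a p : Int) (rs : List (Int × Int)) :
    ∃ b r, mergeRuns a p rs = (a, b) :: r := by
  cases rs with
  | nil => exact ⟨p, [], rfl⟩
  | cons cd r =>
    obtain ⟨c, d⟩ := cd
    by_cases h : c = p + 1
    · exact ⟨d, r, by simp [mergeRuns, h]⟩
    · exact ⟨p, (c, d) :: r, by simp [mergeRuns, h]⟩

lemma mergeRuns_merge (a prev v : Int) (rs : List (Int × Int)) (h : v = prev + 1) :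
    mergeRuns a prev (mergeRuns v v rs) = mergeRuns a v rs := by
  subst h
  cases rs with
  | nil => simp [mergeRuns]
  | cons cd r =>
    obtain ⟨c, d⟩ := cd
    by_cases hc : c = prev + 1 + 1
    · simp [mergeRuns, hc]
    · simp [mergeRuns, hc]

-- join helpers
lemma ofList_cons_comma (l : List Char) : String.ofList (',' :: l) = "," ++ String.ofList l := by
  have h : (',' :: l) = [','] ++ l := rfl
  rw [h, String.ofList_append]

lemma join_nil : PySem.Str.join "," ([] : List String) = "" := rfl

lemma join_single (a : String) : PySem.Str.join "," [a] = a := by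
  simp [PySem.Str.join, PySem.Chars.join, List.intercalate]

lemma join_cons_cons (a b : String) (rest : List String) :
    PySem.Str.join "," (a :: b :: rest) = a ++ "," ++ PySem.Str.join "," (b :: rest) := by
  simp [PySem.Str.join, PySem.Chars.join, List.intercalate, ofList_cons_comma, String.append_assoc]

-- A's loop, re-expressed structurally: prev = previous element, inr = in_range, glob = output so far
def goA : Int → List Int → Bool → String → String
  | _, [], _, glob => glob
  | prev, v :: tl, inr, glob =>
    if v ≠ prev + 1 then
      goA v tl false ((if inr then glob ++ "-" ++ PySem.Int.toStr prev else glob) ++ "," ++ PySem.Int.toStr v)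
    else if tl = [] then glob ++ "-" ++ PySem.Int.toStr v
    else goA v tl true glob

-- A's structural loop produces exactly the rendered runs
lemma goA_runs : ∀ (rest : List Int) (prev a : Int) (g : String),
    a ≤ prev → (rest = [] → prev = a) →
    goA prev rest (decide (prev ≠ a)) (g ++ PySem.Int.toStr a)
      = g ++ PySem.Str.join "," ((mergeRuns a prev (runsOf rest)).map renderRun) := by
  intro rest
  induction rest with
  | nil =>
    intro prev a g _ hlast
    have h := hlast rfl
    subst h
    simp [goA, mergeRuns, runsOf, renderRun, join_single]
  | cons v tl ih =>
    intro prev a g hle _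
    by_cases hbrk : v = prev + 1
    · by_cases htl : tl = []
      · subst htl
        simp [goA, hbrk, runsOf, mergeRuns, renderRun, join_single, String.append_assoc]
        omega
      · have step : goA prev (v :: tl) (decide (prev ≠ a)) (g ++ PySem.Int.toStr a)
            = goA v tl true (g ++ PySem.Int.toStr a) := by
          simp [goA, hbrk, htl]
        have hva : v ≠ a := by omega
        have ihx := ih v a g (by omega) (fun hh => absurd hh htl)
        have htrue : (decide (v ≠ a)) = true := by simp [hva]
        rw [htrue] at ihx
        rw [step, ihx, show runsOf (v :: tl) = mergeRuns v v (runsOf tl) from rfl,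
          mergeRuns_merge a prev v _ hbrk]
    · obtain ⟨b, r, hr⟩ := mergeRuns_head v v (runsOf tl)
      have hruns : runsOf (v :: tl) = (v, b) :: r := hr
      have hmr : mergeRuns a prev (runsOf (v :: tl)) = (a, prev) :: (v, b) :: r := by
        rw [hruns]; simp [mergeRuns, hbrk]
      have step : goA prev (v :: tl) (decide (prev ≠ a)) (g ++ PySem.Int.toStr a)
          = goA v tl false
            (((if decide (prev ≠ a) = true then (g ++ PySem.Int.toStr a) ++ "-" ++ PySem.Int.toStr prev
               else g ++ PySem.Int.toStr a) ++ ",") ++ PySem.Int.toStr v) := by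
        simp [goA, hbrk, String.append_assoc]
      have ihv := ih v v
        ((if decide (prev ≠ a) = true then (g ++ PySem.Int.toStr a) ++ "-" ++ PySem.Int.toStr prev
          else g ++ PySem.Int.toStr a) ++ ",") le_rfl (fun _ => rfl)
      have hfalse : (decide (v ≠ v)) = false := by simp
      rw [hfalse] at ihv
      rw [step, ihv, hmr, show mergeRuns v v (runsOf tl) = runsOf (v :: tl) from rfl, hruns]
      simp only [List.map_cons]
      rw [join_cons_cons]
      by_cases hpa : prev = a
      · subst hpa
        simp [renderRun, String.append_assoc]
      · have hd2 : (decide (prev ≠ a)) = true := by simp [hpa]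
        rw [hd2]
        simp [renderRun, Ne.symm hpa, String.append_assoc]

-- bridge: A's indexed foldl over the tail of s equals the structural loop goA
lemma foldl_aBody_eq_goA (s : List Int) : ∀ (rest pre : List Int) (prev : Int) (b : Bool) (g : String),
    s = pre ++ prev :: rest →
    ((PySem.List.enumerate rest ((pre.length : Int) + 1)).foldl (aBody s) (b, g)).2 = goA prev rest b g := by
  intro rest
  induction rest with
  | nil => intro pre prev b g _; simp [PySem.List.enumerate_nil, goA]
  | cons v tl ih =>
    intro pre prev b g hs
    rw [PySem.List.enumerate_cons, List.foldl_cons]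
    have hi0 : ((pre.length : Int) + 1) ≠ 0 := by omega
    have hprev : s[pre.length]?.getD 0 = prev := by
      rw [hs]; simp
    have hlen : s.length = pre.length + 2 + tl.length := by
      rw [hs]; simp; omega
    by_cases hbrk : v = prev + 1
    · by_cases htl : tl = []
      · subst htl
        have hlast : (pre.length : Int) + 1 + 1 = (s.length : Int) := by simp at hlen; omega
        simp [aBody, hi0, hprev, hbrk, hlast, PySem.List.enumerate_nil, goA]
      · have hnotlast : ((pre.length : Int) + 1 + 1 = (s.length : Int)) = False := by
          simp only [eq_iff_iff, iff_false]
          have h0 : tl.length ≠ 0 := by simpa [List.length_eq_zero_iff] using htl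
          omega
        have step : aBody s (b, g) ((pre.length : Int) + 1, v) = (true, g) := by
          simp [aBody, hi0, hprev, hbrk, hnotlast]
        rw [step]
        have := ih (pre ++ [prev]) v true g (by rw [hs]; simp)
        have harith : ((pre ++ [prev]).length : Int) + 1 = (pre.length : Int) + 1 + 1 := by
          simp
        rw [harith] at this
        rw [this]
        simp [goA, hbrk, htl]
    · have step : aBody s (b, g) ((pre.length : Int) + 1, v) =
          (false, (if b then g ++ "-" ++ PySem.Int.toStr prev else g) ++ "," ++ PySem.Int.toStr v) := by
        cases b <;> simp [aBody, hi0, hprev, hbrk]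
      rw [step]
      have := ih (pre ++ [prev]) v false
        ((if b then g ++ "-" ++ PySem.Int.toStr prev else g) ++ "," ++ PySem.Int.toStr v)
        (by rw [hs]; simp)
      have harith : ((pre ++ [prev]).length : Int) + 1 = (pre.length : Int) + 1 + 1 := by
        simp
      rw [harith] at this
      rw [this]
      simp [goA, hbrk]

-- B side: the break indices of the tail, 0-based and relative, by right recursion
def brk : Int → List Int → List Int
  | _, [] => []
  | prev, w :: tl => (if w ≠ prev + 1 then [(0 : Int)] else []) ++ (brk w tl).map (· + 1)

lemma getAt (pre : List Int) (x : Int) (tl : List Int) :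
    PySem.List.pyGetD (pre ++ x :: tl) ((pre.length : Int)) 0 = x := by
  rw [PySem.List.pyGetD_natCast]
  simp [List.getD_eq_getElem?_getD]

-- the filter over range(a+1, n+1) is exactly the shifted break indices plus the final bound n
lemma brk_filter : ∀ (tl : List Int) (prev : Int) (pre : List Int),
    (PySem.List.pyRange ((pre.length : Int) + 1) (((pre ++ prev :: tl).length : Int) + 1) 1).filter
        (condB (pre ++ prev :: tl) ((pre ++ prev :: tl).length : Int))
      = (brk prev tl).map (fun i => i + (pre.length : Int) + 1) ++ [((pre ++ prev :: tl).length : Int)] := by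
  intro tl
  induction tl with
  | nil =>
    intro prev pre
    have hn : (((pre ++ [prev]).length : Int)) = (pre.length : Int) + 1 := by simp
    rw [hn, show ((pre.length : Int) + 1 + 1) = ((pre.length : Int) + 1) + 1 from rfl,
      PySem.List.pyRange_one_singleton]
    simp [condB, brk]
  | cons w tl' ih =>
    intro prev pre
    have hlen : (((pre ++ prev :: w :: tl').length : Int)) = (pre.length : Int) + 2 + (tl'.length : Int) := by
      simp; omega
    have hrange : PySem.List.pyRange ((pre.length : Int) + 1) (((pre ++ prev :: w :: tl').length : Int) + 1) 1
        = ((pre.length : Int) + 1) ::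
          PySem.List.pyRange ((pre.length : Int) + 1 + 1) (((pre ++ prev :: w :: tl').length : Int) + 1) 1 :=
      PySem.List.pyRange_one_cons (by omega)
    have hassoc : (pre ++ [prev]) ++ w :: tl' = pre ++ prev :: w :: tl' := by simp
    have hva : PySem.List.pyGetD (pre ++ prev :: w :: tl') ((pre.length : Int) + 1) 0 = w := by
      have h := getAt (pre ++ [prev]) w tl'
      rw [hassoc] at h
      simpa using h
    have hvp : PySem.List.pyGetD (pre ++ prev :: w :: tl') ((pre.length : Int) + 1 - 1) 0 = prev := by
      have h := getAt pre prev (w :: tl')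
      simpa using h
    have hcond : condB (pre ++ prev :: w :: tl') (((pre ++ prev :: w :: tl').length : Int))
        ((pre.length : Int) + 1) = decide (w ≠ prev + 1) := by
      have h0 : ((((pre.length : Int) + 1)) == (0 : Int)) = false := by
        simp only [beq_eq_false_iff_ne]; omega
      have hnn : ((((pre.length : Int) + 1)) == (((pre ++ prev :: w :: tl').length : Int))) = false := by
        simp only [beq_eq_false_iff_ne]; omega
      simp only [condB, h0, hnn, Bool.false_or, hva, hvp]
    have ihx := ih w (pre ++ [prev])
    rw [hassoc] at ihx
    have hl1 : (((pre ++ [prev]).length : Int)) = (pre.length : Int) + 1 := by simp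
    rw [hl1] at ihx
    have hmap : ((brk w tl').map (fun i => (i : Int) + 1)).map (fun i => i + (pre.length : Int) + 1)
        = (brk w tl').map (fun i => i + ((pre.length : Int) + 1) + 1) := by
      rw [List.map_map]
      exact List.map_congr_left (fun i _ => by simp [Function.comp]; ring)
    rw [hrange, List.filter_cons, hcond, ihx]
    by_cases hbw : w = prev + 1
    · rw [if_neg (by simp [hbw])]
      rw [show brk prev (w :: tl') = (brk w tl').map (fun i => i + 1) from by simp [brk, hbw]]
      rw [hmap]
    · rw [if_pos (by simp [hbw])]
      rw [show brk prev (w :: tl') = (0 : Int) :: (brk w tl').map (fun i => i + 1) from by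
        simp [brk, hbw]]
      simp only [List.map_cons, hmap, List.cons_append, zero_add]

-- correspondence between adjacent boundary pairs and the runs (values at boundary indices)
lemma corr : ∀ (tl : List Int) (prev : Int) (pre : List Int),
    List.Forall₂ (fun (p : Int × Int) (r : Int × Int) =>
        PySem.List.pyGetD (pre ++ prev :: tl) p.1 0 = r.1 ∧
        PySem.List.pyGetD (pre ++ prev :: tl) (p.2 - 1) 0 = r.2 ∧
        r.2 - r.1 = p.2 - p.1 - 1)
      (((pre.length : Int) :: ((brk prev tl).map (fun i => i + (pre.length : Int) + 1)
          ++ [((pre ++ prev :: tl).length : Int)])).zip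
        ((brk prev tl).map (fun i => i + (pre.length : Int) + 1)
          ++ [((pre ++ prev :: tl).length : Int)]))
      (runsOf (prev :: tl)) := by
  intro tl
  induction tl with
  | nil =>
    intro prev pre
    have hn : (((pre ++ [prev]).length : Int)) = (pre.length : Int) + 1 := by simp
    simp only [brk, List.map_nil, List.nil_append, hn, List.zip_cons_cons, List.zip_nil_right]
    refine List.Forall₂.cons ?_ List.Forall₂.nil
    refine ⟨getAt pre prev [], ?_, by omega⟩
    have h1 : ((pre.length : Int) + 1 - 1) = (pre.length : Int) := by ring
    rw [h1]
    exact getAt pre prev []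
  | cons w tl' ih =>
    intro prev pre
    have hassoc : (pre ++ [prev]) ++ w :: tl' = pre ++ prev :: w :: tl' := by simp
    have hl1 : (((pre ++ [prev]).length : Int)) = (pre.length : Int) + 1 := by simp
    have hmap : ((brk w tl').map (fun i => (i : Int) + 1)).map (fun i => i + (pre.length : Int) + 1)
        = (brk w tl').map (fun i => i + ((pre.length : Int) + 1) + 1) := by
      rw [List.map_map]
      exact List.map_congr_left (fun i _ => by simp [Function.comp]; ring)
    have ihx := ih w (pre ++ [prev])
    rw [hassoc, hl1] at ihx
    have hgetw : PySem.List.pyGetD (pre ++ prev :: w :: tl') ((pre.length : Int) + 1) 0 = w := by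
      have h := getAt (pre ++ [prev]) w tl'
      rw [hassoc] at h
      simpa using h
    have hgetp : PySem.List.pyGetD (pre ++ prev :: w :: tl') ((pre.length : Int)) 0 = prev :=
      getAt pre prev (w :: tl')
    by_cases hbw : w = prev + 1
    · -- merge: head boundary moves from index a+1 down to a, runs head start moves from w to prev
      rw [show brk prev (w :: tl') = (brk w tl').map (fun i => i + 1) from by simp [brk, hbw]]
      rw [hmap]
      rcases hM : (brk w tl').map (fun i => i + ((pre.length : Int) + 1) + 1)
          ++ [((pre ++ prev :: w :: tl').length : Int)] with _ | ⟨t0, T⟩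
      · exact absurd hM (by simp)
      · simp only [hM] at ihx ⊢
        simp only [List.zip_cons_cons] at ihx ⊢
        rw [List.forall₂_cons_left_iff] at ihx
        obtain ⟨rh, rt, hR, hFa, hrw⟩ := ihx
        obtain ⟨rh1, rh2⟩ := rh
        obtain ⟨hR1, hR2, hR3⟩ := hR
        simp only at hR1 hR2 hR3
        have hrh1 : rh1 = w := by rw [hgetw] at hR1; omega
        have hruns : runsOf (prev :: w :: tl') = (prev, rh2) :: rt := by
          show mergeRuns prev prev (runsOf (w :: tl')) = _
          rw [hrw]
          simp [mergeRuns, hrh1, hbw]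
        rw [hruns]
        exact List.Forall₂.cons ⟨hgetp, hR2, by omega⟩ hFa
    · -- break: a fresh singleton run (prev, prev) in front
      rw [show brk prev (w :: tl') = (0 : Int) :: (brk w tl').map (fun i => i + 1) from by
        simp [brk, hbw]]
      simp only [List.map_cons, hmap, List.cons_append, zero_add]
      obtain ⟨b, r, hr⟩ := mergeRuns_head w w (runsOf tl')
      have hruns : runsOf (prev :: w :: tl') = (prev, prev) :: runsOf (w :: tl') := by
        show mergeRuns prev prev (runsOf (w :: tl')) = _
        rw [show runsOf (w :: tl') = (w, b) :: r from hr]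
        simp [mergeRuns, hbw]
      rw [hruns]
      simp only [List.zip_cons_cons] at ihx ⊢
      refine List.Forall₂.cons ?_ ihx
      refine ⟨hgetp, ?_, by omega⟩
      have h1 : ((pre.length : Int) + 1 - 1) = (pre.length : Int) := by ring
      rw [h1]
      exact hgetp

lemma map_render_of_corr (s : List Int) : ∀ (l₁ : List (Int × Int)) (l₂ : List (Int × Int)),
    List.Forall₂ (fun (p : Int × Int) (r : Int × Int) =>
        PySem.List.pyGetD s p.1 0 = r.1 ∧
        PySem.List.pyGetD s (p.2 - 1) 0 = r.2 ∧
        r.2 - r.1 = p.2 - p.1 - 1) l₁ l₂ →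
    l₁.map (renderB s) = l₂.map renderRun := by
  intro l₁ l₂ h
  induction h with
  | nil => rfl
  | @cons p r t₁ t₂ hpr htl ih =>
    obtain ⟨h1, h2, h3⟩ := hpr
    have hhead : renderB s p = renderRun r := by
      by_cases hd : p.2 - p.1 = 1
      · have : r.1 = r.2 := by omega
        simp [renderB, renderRun, hd, h1, this]
      · have : r.1 ≠ r.2 := by omega
        simp [renderB, renderRun, hd, h1, h2, this]
    simp [hhead, ih]

lemma bounds_cons (v : Int) (tl : List Int) :
    boundsB (v :: tl) = (0 : Int) :: ((brk v tl).map (fun i => i + 1)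
      ++ [(((v :: tl).length : Int))]) := by
  have hl : (0 : Int) < ((v :: tl).length : Int) + 1 := by simp; omega
  rw [boundsB, PySem.List.pyRange_one_cons hl, List.filter_cons]
  have hc0 : condB (v :: tl) (((v :: tl).length : Int)) 0 = true := by simp [condB]
  rw [hc0, if_pos rfl]
  have h := brk_filter tl v []
  simp only [List.nil_append, List.length_nil, Int.natCast_zero] at h
  rw [h]
  simp only [add_zero]

lemma ports_agree (vlans : List Int) : vlan_list_to_glob vlans = vlan_list_to_glob_alt vlans := by
  unfold vlan_list_to_glob vlan_list_to_glob_alt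
  cases hs : PySem.List.sorted vlans (fun x => x) false with
  | nil =>
    have h01 : PySem.List.pyRange (0 : Int) 1 1 = [0] := by
      simpa using PySem.List.pyRange_one_singleton (a := (0 : Int))
    simp [PySem.List.enumerate_nil, boundsB, condB, h01, join_nil]
  | cons v tl =>
    -- A side
    rw [PySem.List.enumerate_cons, List.foldl_cons]
    have step0 : aBody (v :: tl) ((false : Bool), ("" : String)) (0, v) = (false, PySem.Int.toStr v) := by
      simp [aBody]
    rw [step0]
    have hbr := foldl_aBody_eq_goA (v :: tl) tl [] v false (PySem.Int.toStr v) rfl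
    simp only [List.length_nil, Int.natCast_zero] at hbr
    rw [hbr]
    have hmain := goA_runs tl v v "" le_rfl (fun _ => rfl)
    have hd : (decide (v ≠ v)) = false := by simp
    rw [hd] at hmain
    have hemp : ("" : String) ++ PySem.Int.toStr v = PySem.Int.toStr v := by simp
    rw [hemp] at hmain
    rw [hmain, show mergeRuns v v (runsOf tl) = runsOf (v :: tl) from rfl]
    -- B side
    rw [bounds_cons, List.drop_one, List.tail_cons]
    have hcorr := corr tl v []
    simp only [List.nil_append, List.length_nil, Int.natCast_zero] at hcorr
    have hlist : ((brk v tl).map (fun i => i + (0 : Int) + 1)) = (brk v tl).map (fun i => i + 1) := by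
      exact List.map_congr_left (fun i _ => by ring)
    rw [hlist] at hcorr
    have hmapeq := map_render_of_corr (v :: tl) _ _ hcorr
    rw [hmapeq]
    simp

-- ===== VERDICT (by name: the statement is the Claim_ definition above) =====
theorem vlan_list_to_glob_spec : Claim_equal_vlan_list_to_glob := by
  intro vlans _
  unfold Spec_vlan_list_to_glob
  exact ports_agree vlans
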